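-- pv_equiv track=rewrite | github.com/ArthurBoaro/my-daily-coding-challenge-fcc | February 14, 2026.py | get_difficulty
-- ===== SOURCE A (Python) =====
-- def get_difficulty(track):
--
--     points = 0
--     lastTurn = None
--
--     for turn in track:
--         if turn in ("L", "R"):
--             if lastTurn in ("L", "R"):
--                 if lastTurn != turn:
--                     points += 15
--                 else:
--                     points += 5
--             else:
--                 points += 5
--             lastTurn = turn
--         else:
--             lastTurn = None
--
--     if points >= 200:
--         return "Hard"
--     elif points > 100:
--         return "Medium"
--
--     return "Easy"
-- ===== SOURCE B (Python) =====
-- def get_difficulty(track):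
--     LR = ("L", "R")
--     turns = sum(1 for t in track if t in LR)
--     changes = sum(1 for a, b in zip(track, track[1:])
--                   if a in LR and b in LR and a != b)
--     points = 5 * turns + 10 * changes
--     if points >= 200:
--         return "Hard"
--     if points > 100:
--         return "Medium"
--     return "Easy"
-- ===== Notes on version B (the rewrite author's own statement) =====
-- stated objective: alternative
-- what changed: Replaces A's stateful single loop (points accumulator plus a lastTurn carried across iterations) by two independent counts over the list: the number of turn elements and the number of adjacent zipped pairs of differing turns; points = 5*turns + 10*changes, then the same thresholds.
import Mathlib
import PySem

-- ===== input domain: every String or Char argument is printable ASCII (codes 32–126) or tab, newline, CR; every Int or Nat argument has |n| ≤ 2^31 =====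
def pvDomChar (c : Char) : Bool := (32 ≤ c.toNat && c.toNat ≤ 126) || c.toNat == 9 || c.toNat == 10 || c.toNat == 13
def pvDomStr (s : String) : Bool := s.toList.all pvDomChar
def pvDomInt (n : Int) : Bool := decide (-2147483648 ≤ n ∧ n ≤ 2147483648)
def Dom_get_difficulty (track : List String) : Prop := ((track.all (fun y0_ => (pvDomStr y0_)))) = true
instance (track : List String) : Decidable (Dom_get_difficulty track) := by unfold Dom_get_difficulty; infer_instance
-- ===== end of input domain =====

-- ===== PORT A =====
-- B replaces A's stateful single loop by two independent counts (turns and adjacent changes); same return values.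

-- A's for-loop: carries (points, lastTurn) across the list, as the Python does.
def gdLoop (track : List String) (points : Int) (lastTurn : Option String) : Int :=
  match track with
  | [] => points
  | turn :: rest =>
    if turn == "L" || turn == "R" then
      let points' :=
        match lastTurn with
        | some lt =>
          if lt == "L" || lt == "R" then
            (if lt != turn then points + 15 else points + 5)
          else points + 5
        | none => points + 5
      gdLoop rest points' (some turn)
    else
      gdLoop rest points none

def get_difficulty (track : List String) : String :=
  let points := gdLoop track 0 none
  if points ≥ 200 then "Hard"
  else if points > 100 then "Medium"
  else "Easy"

-- ===== PORT B =====
def pvIsTurn (t : String) : Bool := t == "L" || t == "R"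

def get_difficulty_alt (track : List String) : String :=
  let turns : Int := (track.countP pvIsTurn : Nat)
  let changes : Int :=
    (((track.zip (track.drop 1)).countP
        (fun p => pvIsTurn p.1 && pvIsTurn p.2 && p.1 != p.2)) : Nat)
  let points := 5 * turns + 10 * changes
  if points ≥ 200 then "Hard"
  else if points > 100 then "Medium"
  else "Easy"

-- ===== PRECONDITION & SPEC =====
def Spec_get_difficulty (track : List String) (out : String) : Prop := out = get_difficulty_alt track
instance (track : List String) (out : String) : Decidable (Spec_get_difficulty track out) := by unfold Spec_get_difficulty; infer_instance

-- ===== CLAIM (what is proved, stated in full; the proofs are below) =====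
def Claim_equal_get_difficulty : Prop := ∀ (track : List String), Dom_get_difficulty track → Spec_get_difficulty track (get_difficulty track)

-- ===== LEMMAS AND PROOFS =====

-- extra points contributed by direction changes, given the carried lastTurn
def gdChg : Option String → List String → Int
  | _, [] => 0
  | last, x :: xs =>
    (if pvIsTurn x && (match last with | some t => pvIsTurn t && t != x | none => false)
     then (10 : Int) else 0)
    + gdChg (if pvIsTurn x then some x else none) xs

theorem gdLoop_eq (xs : List String) : ∀ (p : Int) (last : Option String),
    gdLoop xs p last = p + 5 * ((xs.countP pvIsTurn : Nat) : Int) + gdChg last xs := by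
  induction xs with
  | nil => intro p last; simp [gdLoop, gdChg]
  | cons x xs ih =>
    intro p last
    by_cases hx : (x == "L" || x == "R") = true
    · cases last with
      | none =>
        simp only [gdLoop, gdChg]
        rw [if_pos hx, ih]
        simp [pvIsTurn, hx]
        ring
      | some lt =>
        by_cases hlt : (lt == "L" || lt == "R") = true
        · by_cases hne : (lt != x) = true
          · simp only [gdLoop, gdChg]
            rw [if_pos hx, ih]
            simp [pvIsTurn, hx, hlt, hne]
            ring
          · simp only [gdLoop, gdChg]
            rw [if_pos hx, ih]
            simp [pvIsTurn, hx, hlt, hne]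
            ring
        · simp only [gdLoop, gdChg]
          rw [if_pos hx, ih]
          simp [pvIsTurn, hx, hlt]
          ring
    · simp only [gdLoop, gdChg]
      rw [if_neg hx, ih]
      simp [pvIsTurn, hx]

theorem gdChg_zip (xs : List String) : ∀ (x : String),
    gdChg (if pvIsTurn x then some x else none) xs
      = 10 * ((((x :: xs).zip xs).countP
          (fun p => pvIsTurn p.1 && pvIsTurn p.2 && p.1 != p.2) : Nat) : Int) := by
  induction xs with
  | nil => intro x; simp [gdChg]
  | cons y ys ih =>
    intro x
    have hrec := ih y
    by_cases hx : pvIsTurn x = true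
    · simp only [gdChg, hx, List.zip_cons_cons, List.countP_cons, hrec]
      by_cases hy : pvIsTurn y = true
      · by_cases hne : (x != y) = true
        · simp [hx, hy, hne]; ring
        · simp [hx, hy, hne]
      · simp [hx, hy]
    · simp only [gdChg, hx, List.zip_cons_cons, List.countP_cons, hrec]
      simp

theorem gdChg_none (xs : List String) :
    gdChg none xs
      = 10 * (((xs.zip (xs.drop 1)).countP
          (fun p => pvIsTurn p.1 && pvIsTurn p.2 && p.1 != p.2) : Nat) : Int) := by
  cases xs with
  | nil => simp [gdChg]
  | cons x xs =>
    have h := gdChg_zip xs x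
    simp only [gdChg, List.drop_one, List.tail_cons]
    by_cases hx : pvIsTurn x = true
    · simpa [hx, pvIsTurn] using h
    · simpa [hx, pvIsTurn] using h

-- ===== VERDICT (by name: the statement is the Claim_ definition above) =====
theorem get_difficulty_spec : Claim_equal_get_difficulty := by
  intro track _
  unfold Spec_get_difficulty get_difficulty get_difficulty_alt
  rw [gdLoop_eq, gdChg_none]
  ring_nf
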